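-- pv_equiv track=rewrite | github.com/bubustein/PI-Swarm | lib/python/enhanced_storage_manager.py | _parse_gluster_volume_info
-- ===== SOURCE A (Python) =====
-- from typing import Dict, List, Optional, Any, Tuple
--
-- def _parse_gluster_volume_info(volume_info: str) -> List[Dict]:
--     """Parse GlusterFS volume information"""
--     volumes = []
--     current_volume = {}
--
--     for line in volume_info.split('\n'):
--         line = line.strip()
--         if line.startswith('Volume Name:'):
--             if current_volume:
--                 volumes.append(current_volume)
--             current_volume = {'name': line.split(':', 1)[1].strip()}
--         elif line.startswith('Type:'):
--             current_volume['type'] = line.split(':', 1)[1].strip()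
--         elif line.startswith('Status:'):
--             current_volume['status'] = line.split(':', 1)[1].strip()
--         elif line.startswith('Number of Bricks:'):
--             current_volume['brick_count'] = line.split(':', 1)[1].strip()
--
--     if current_volume:
--         volumes.append(current_volume)
--
--     return volumes
-- ===== SOURCE B (Python) =====
-- # Two-phase re-implementation: group stripped lines into blocks starting at each
-- # 'Volume Name:' line, then parse each block with a prefix table; keep non-empty dicts.
-- _FIELDS = [('Volume Name:', 'name'), ('Type:', 'type'),
--            ('Status:', 'status'), ('Number of Bricks:', 'brick_count')]
--
-- def _parse_block(block):
--     d = {}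
--     for line in block:
--         for prefix, key in _FIELDS:
--             if line.startswith(prefix):
--                 d[key] = line.split(':', 1)[1].strip()
--                 break
--     return d
--
-- def _parse_gluster_volume_info(volume_info):
--     lines = [l.strip() for l in volume_info.split('\n')]
--     blocks = []
--     cur = []
--     for line in lines:
--         if line.startswith('Volume Name:'):
--             blocks.append(cur)
--             cur = [line]
--         else:
--             cur.append(line)
--     blocks.append(cur)
--     return [d for d in map(_parse_block, blocks) if d]
-- ===== Notes on version B (the rewrite author's own statement) =====
-- stated objective: alternative
-- what changed: Replaces A's single-pass flush-on-boundary state machine with a two-phase decomposition: first group stripped lines into blocks starting at each 'Volume Name:' line, then map each block to a dict via a prefix->key table and keep the non-empty dicts.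
import Mathlib
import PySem

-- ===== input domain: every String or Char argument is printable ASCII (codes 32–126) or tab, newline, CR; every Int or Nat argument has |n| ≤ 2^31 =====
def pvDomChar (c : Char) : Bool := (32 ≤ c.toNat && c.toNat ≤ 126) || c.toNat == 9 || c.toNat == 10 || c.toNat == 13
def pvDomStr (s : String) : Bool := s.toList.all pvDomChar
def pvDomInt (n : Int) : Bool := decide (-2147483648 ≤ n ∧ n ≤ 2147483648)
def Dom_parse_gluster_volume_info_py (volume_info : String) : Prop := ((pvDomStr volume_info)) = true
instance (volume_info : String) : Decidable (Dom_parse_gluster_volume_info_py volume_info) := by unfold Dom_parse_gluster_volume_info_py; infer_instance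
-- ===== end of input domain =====

-- B re-implements A's flush-on-boundary state machine as two phases: group lines into blocks
-- at 'Volume Name:' boundaries, then parse each block with a prefix table (objective: alternative decomposition).


-- line.split(':', 1)[1].strip(); exact at every call site of both programs, because there the
-- line starts with a prefix containing ':', so split(':', 1) always has a second piece.
def pvAfterColon (line : String) : String :=
  PySem.Str.strip (((PySem.Str.splitMax? line ":" 1).getD []).getD 1 "")

-- ===== PORT A =====
-- loop body of A: state = (volumes, current_volume)
def pvAStep (st : List (PySem.Dict String String) × PySem.Dict String String) (rawline : String) :
    List (PySem.Dict String String) × PySem.Dict String String :=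
  let line := PySem.Str.strip rawline
  if PySem.Str.startswith line "Volume Name:" then
    (st.1 ++ (if st.2.items ≠ [] then [st.2] else []),
     PySem.Dict.empty.insert "name" (pvAfterColon line))
  else if PySem.Str.startswith line "Type:" then (st.1, st.2.insert "type" (pvAfterColon line))
  else if PySem.Str.startswith line "Status:" then (st.1, st.2.insert "status" (pvAfterColon line))
  else if PySem.Str.startswith line "Number of Bricks:" then
    (st.1, st.2.insert "brick_count" (pvAfterColon line))
  else st

def parse_gluster_volume_info_py (volume_info : String) : List (List (String × String)) :=
  let st := ((PySem.Str.split? volume_info "\n").getD []).foldl pvAStep ([], PySem.Dict.empty)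
  ((st.1 ++ (if st.2.items ≠ [] then [st.2] else [])).map (·.items))

-- ===== PORT B =====
def pvFields : List (String × String) :=
  [("Volume Name:", "name"), ("Type:", "type"), ("Status:", "status"),
   ("Number of Bricks:", "brick_count")]

-- inner for-loop with break of _parse_block: first matching field, if any
def pvParseBlockLine (d : PySem.Dict String String) (line : String) : PySem.Dict String String :=
  match pvFields.find? (fun pk => PySem.Str.startswith line pk.1) with
  | some pk => d.insert pk.2 (pvAfterColon line)
  | none => d

def pvParseBlock (block : List String) : List (String × String) :=
  (block.foldl pvParseBlockLine PySem.Dict.empty).items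

-- grouping loop of B: state = (blocks, cur)
def pvBStep (st : List (List String) × List String) (line : String) :
    List (List String) × List String :=
  if PySem.Str.startswith line "Volume Name:" then (st.1 ++ [st.2], [line])
  else (st.1, st.2 ++ [line])

def parse_gluster_volume_info_py_alt (volume_info : String) : List (List (String × String)) :=
  let lines := ((PySem.Str.split? volume_info "\n").getD []).map PySem.Str.strip
  let st := lines.foldl pvBStep ([], [])
  (((st.1 ++ [st.2]).map pvParseBlock).filter (· ≠ []))

-- ===== PRECONDITION & SPEC =====
def Spec_parse_gluster_volume_info_py (volume_info : String) (out : List (List (String × String))) : Prop := out = parse_gluster_volume_info_py_alt volume_info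
instance (volume_info : String) (out : List (List (String × String))) : Decidable (Spec_parse_gluster_volume_info_py volume_info out) := by unfold Spec_parse_gluster_volume_info_py; infer_instance

-- ===== CLAIM (what is proved, stated in full; the proofs are below) =====
def Claim_equal_parse_gluster_volume_info_py : Prop := ∀ (volume_info : String), Dom_parse_gluster_volume_info_py volume_info → Spec_parse_gluster_volume_info_py volume_info (parse_gluster_volume_info_py volume_info)

-- ===== LEMMAS AND PROOFS =====

-- the block-level dict B builds for a block
def pvParseFold (block : List String) : PySem.Dict String String :=
  block.foldl pvParseBlockLine PySem.Dict.empty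

-- B's grouping step over RAW lines (strip applied inside), to share the fold list with A
def pvBStep' (st : List (List String) × List String) (raw : String) :
    List (List String) × List String :=
  pvBStep st (PySem.Str.strip raw)

lemma pvParseFold_append_singleton (block : List String) (line : String) :
    pvParseFold (block ++ [line]) = pvParseBlockLine (pvParseFold block) line := by
  simp [pvParseFold]

-- A's finalized list of dicts from an arbitrary state, and B's from an arbitrary grouping state
def pvAfin (lines : List String) (vols : List (PySem.Dict String String))
    (d : PySem.Dict String String) : List (PySem.Dict String String) :=
  let st := lines.foldl pvAStep (vols, d)
  st.1 ++ (if st.2.items ≠ [] then [st.2] else [])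

def pvBfin (lines : List String) (blocks : List (List String)) (cur : List String) :
    List (PySem.Dict String String) :=
  let st := lines.foldl pvBStep' (blocks, cur)
  ((st.1 ++ [st.2]).map pvParseFold).filter (fun d => d.items ≠ [])

lemma pvMain : ∀ (lines : List String) (vols : List (PySem.Dict String String))
    (blocks : List (List String)) (cur : List String),
    vols = (blocks.map pvParseFold).filter (fun d => d.items ≠ []) →
    pvAfin lines vols (pvParseFold cur) = pvBfin lines blocks cur := by
  intro lines
  induction lines with
  | nil =>
    intro vols blocks cur h
    simp [pvAfin, pvBfin, h, List.filter_append]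
    split <;> simp_all
  | cons raw rest ih =>
    intro vols blocks cur h
    by_cases h1 : PySem.Str.startswith (PySem.Str.strip raw) "Volume Name:" = true
    · simp at h1
      have hA : pvAStep (vols, pvParseFold cur) raw
          = (vols ++ (if (pvParseFold cur).items ≠ [] then [pvParseFold cur] else []),
             PySem.Dict.empty.insert "name" (pvAfterColon (PySem.Str.strip raw))) := by
        simp [pvAStep, h1]
      have hB : pvBStep' (blocks, cur) raw = (blocks ++ [cur], [PySem.Str.strip raw]) := by
        simp [pvBStep', pvBStep, h1]
      have hsingle : pvParseFold [PySem.Str.strip raw]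
          = PySem.Dict.empty.insert "name" (pvAfterColon (PySem.Str.strip raw)) := by
        simp [pvParseFold, pvParseBlockLine, pvFields, h1]
      simp only [pvAfin, pvBfin, List.foldl_cons, hA, hB]
      rw [← hsingle]
      exact ih _ _ _ (by simp [h, List.filter_append]; split <;> simp_all)
    · simp at h1
      have hB : pvBStep' (blocks, cur) raw = (blocks, cur ++ [PySem.Str.strip raw]) := by
        simp [pvBStep', pvBStep, h1]
      have hA : pvAStep (vols, pvParseFold cur) raw
          = (vols, pvParseFold (cur ++ [PySem.Str.strip raw])) := by
        rw [pvParseFold_append_singleton]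
        by_cases h2 : PySem.Str.startswith (PySem.Str.strip raw) "Type:" = true
        · simp at h2; simp [pvAStep, pvParseBlockLine, pvFields, List.find?, h1, h2]
        · simp at h2
          by_cases h3 : PySem.Str.startswith (PySem.Str.strip raw) "Status:" = true
          · simp at h3; simp [pvAStep, pvParseBlockLine, pvFields, List.find?, h1, h2, h3]
          · simp at h3
            by_cases h4 : PySem.Str.startswith (PySem.Str.strip raw) "Number of Bricks:" = true
            · simp at h4; simp [pvAStep, pvParseBlockLine, pvFields, List.find?, h1, h2, h3, h4]
            · simp at h4; simp [pvAStep, pvParseBlockLine, pvFields, List.find?, h1, h2, h3, h4]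
      simp only [pvAfin, pvBfin, List.foldl_cons, hA, hB]
      exact ih _ _ _ h

-- ===== VERDICT (by name: the statement is the Claim_ definition above) =====
theorem parse_gluster_volume_info_py_spec : Claim_equal_parse_gluster_volume_info_py := by
  intro volume_info _
  unfold Spec_parse_gluster_volume_info_py parse_gluster_volume_info_py parse_gluster_volume_info_py_alt
  dsimp only
  rw [List.foldl_map]
  rw [show (fun (st : List (List String) × List String) raw => pvBStep st (PySem.Str.strip raw)) = pvBStep' from rfl]
  have hmain := pvMain ((PySem.Str.split? volume_info "\n").getD []) [] [] [] (by simp)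
  simp only [pvAfin, pvBfin, pvParseFold, List.foldl_nil] at hmain
  rw [hmain]
  have hcomm : ∀ (l : List (List String)),
      ((l.map pvParseFold).filter (fun d => d.items ≠ [])).map PySem.Dict.items
        = (l.map pvParseBlock).filter (fun b => decide (b ≠ [])) := by
    intro l
    induction l with
    | nil => rfl
    | cons b t iht =>
      simp only [List.map_cons, List.filter_cons, pvParseBlock, pvParseFold]
      split <;> simp_all [pvParseFold]
  exact hcomm _
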